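-- pv_equiv track=rewrite | github.com/zbooster/zb_ds_2nd_team8 | shkim/98_CodingTest/09_CoronaKeepDistance/solution.py | solution
-- ===== SOURCE A (Python) =====
-- def solution(lineUp, level):
--     # privPos = -1
--     # for idx, val in enumerate(lineUp):
--     #     if val == 1:
--     #         if privPos < 0:
--     #             privPos = idx
--     #         elif (idx - privPos - 1) < level:
--     #             return False
--     #         else:
--     #             privPos = idx
--
--     cnt = 0
--     startIdx = lineUp.index(1)
--     for val in lineUp[startIdx + 1:]:
--         if val == 0:
--             cnt += 1
--         else:
--             if cnt < level:
--                 return False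
--             cnt = 0
--
--     # position = []
--     # for idx, val in enumerate(lineUp):
--     #     if val == 1:
--     #         position.append(idx)
--     #
--     # for i in range(len(position)):
--     #     if i != 0:
--     #         dist = position[i] - position[i-1] - 1
--     #         if dist < level:
--     #             return False
--
--     return True
-- ===== SOURCE B (Python) =====
-- def solution(lineUp, level):
--     start = lineUp.index(1)
--     n = len(lineUp)
--     for i in range(start, n):
--         if lineUp[i] != 0:
--             for j in range(i + 1, min(i + level + 1, n)):
--                 if lineUp[j] != 0:
--                     return False
--     return True
-- ===== Notes on version B (the rewrite author's own statement) =====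
-- stated objective: alternative
-- what changed: B abandons A's single-pass running zero-counter entirely: it does a windowed brute-force scan, returning False exactly when two non-zero markers at positions >= index(1) lie within distance level of each other (nested range loops), correct because the closest violating pair is always a consecutive-marker pair with too few zeros between.
import Mathlib
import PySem

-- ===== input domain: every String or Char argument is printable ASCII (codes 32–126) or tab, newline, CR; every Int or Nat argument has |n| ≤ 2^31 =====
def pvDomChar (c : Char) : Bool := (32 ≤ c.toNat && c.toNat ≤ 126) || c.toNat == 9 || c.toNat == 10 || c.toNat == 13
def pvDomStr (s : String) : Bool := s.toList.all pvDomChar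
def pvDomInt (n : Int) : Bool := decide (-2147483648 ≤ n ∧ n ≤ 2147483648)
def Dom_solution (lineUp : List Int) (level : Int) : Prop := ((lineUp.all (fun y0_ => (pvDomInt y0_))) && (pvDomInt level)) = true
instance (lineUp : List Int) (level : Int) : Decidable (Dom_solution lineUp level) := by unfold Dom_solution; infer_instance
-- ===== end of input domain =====

-- B replaces A's single-pass zero-counter with a windowed brute-force pair search (nested loops); alternative decomposition, same results.

-- ===== PORT A =====
-- the 'for val in tail' loop with its running counter cnt
def solutionLoop (vals : List Int) (cnt : Int) (level : Int) : Bool :=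
  match vals with
  | [] => true
  | v :: rest =>
    if v == 0 then solutionLoop rest (cnt + 1) level
    else if cnt < level then false
    else solutionLoop rest 0 level

def solution (lineUp : List Int) (level : Int) : Bool :=
  match PySem.List.index? lineUp 1 with
  | none => false  -- lineUp.index(1) raises ValueError; excluded by Pre_solution
  | some startIdx => solutionLoop (PySem.List.slice lineUp (some ((startIdx : Int) + 1)) none) 0 level

-- ===== PORT B =====
-- nested 'for i' / 'for j' loops with early 'return False' become any-of-any, negated
def solution_alt (lineUp : List Int) (level : Int) : Bool :=
  match PySem.List.index? lineUp 1 with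
  | none => false  -- lineUp.index(1) raises ValueError; excluded by Pre_solution
  | some start =>
    !((PySem.List.pyRange (start : Int) (lineUp.length : Int) 1).any (fun i =>
        (PySem.List.pyGetD lineUp i 0 != 0) &&
        (PySem.List.pyRange (i + 1) (min (i + level + 1) (lineUp.length : Int)) 1).any (fun j =>
          PySem.List.pyGetD lineUp j 0 != 0)))

-- ===== PRECONDITION & SPEC =====
-- Pre_ excludes lists not containing 1, on which lineUp.index(1) raises ValueError in both A and B.
def Pre_solution (lineUp : List Int) (level : Int) : Prop := (1 : Int) ∈ lineUp
instance (lineUp : List Int) (level : Int) : Decidable (Pre_solution lineUp level) := by unfold Pre_solution; infer_instance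
def pvWitness_solution : List Int × Int := ([1, 0, 1], 1)

def Spec_solution (lineUp : List Int) (level : Int) (out : Bool) : Prop := out = solution_alt lineUp level
instance (lineUp : List Int) (level : Int) (out : Bool) : Decidable (Spec_solution lineUp level out) := by unfold Spec_solution; infer_instance

-- ===== CLAIM (what is proved, stated in full; the proofs are below) =====
def Claim_equal_solution : Prop := ∀ (lineUp : List Int) (level : Int), Dom_solution lineUp level → Pre_solution lineUp level → Spec_solution lineUp level (solution lineUp level)

-- ===== LEMMAS AND PROOFS =====

-- the common specification both loops decide: a "bad pair" of non-zero entries too close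
-- together in vals, where cnt zeros are already pending before vals[0]
def pairBad (vals : List Int) (cnt level : Int) : Prop :=
  (∃ m : Nat, m < vals.length ∧ vals.getD m 0 ≠ 0 ∧ cnt + m < level) ∨
  (∃ l m : Nat, l < m ∧ m < vals.length ∧ vals.getD l 0 ≠ 0 ∧ vals.getD m 0 ≠ 0 ∧ (m : Int) - l - 1 < level)

theorem getD_drop_int (l : List Int) (n m : Nat) : (l.drop n).getD m 0 = l.getD (n + m) 0 := by
  simp [List.getD_eq_getElem?_getD, List.getElem?_drop]

theorem pairBad_cons_zero (rest : List Int) (cnt level : Int) :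
    pairBad ((0 : Int) :: rest) cnt level ↔ pairBad rest (cnt + 1) level := by
  unfold pairBad
  constructor
  · rintro (⟨m, hm, hz, hc⟩ | ⟨l, m, hlm, hm, hl, hz, hd⟩)
    · cases m with
      | zero => simp at hz
      | succ m' =>
        left
        exact ⟨m', by simpa using hm, by simpa using hz, by push_cast at hc ⊢; omega⟩
    · cases l with
      | zero => simp at hl
      | succ l' =>
        cases m with
        | zero => omega
        | succ m' =>
          right
          exact ⟨l', m', by omega, by simpa using hm, by simpa using hl,
            by simpa using hz, by push_cast at hd ⊢; omega⟩
  · rintro (⟨m, hm, hz, hc⟩ | ⟨l, m, hlm, hm, hl, hz, hd⟩)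
    · left
      exact ⟨m + 1, by simpa using hm, by simpa using hz, by push_cast at hc ⊢; omega⟩
    · right
      exact ⟨l + 1, m + 1, by omega, by simpa using hm, by simpa using hl,
        by simpa using hz, by push_cast at hd ⊢; omega⟩

theorem pairBad_cons_ne (v : Int) (rest : List Int) (cnt level : Int)
    (hv : v ≠ 0) (hc : ¬ cnt < level) :
    pairBad (v :: rest) cnt level ↔ pairBad rest 0 level := by
  unfold pairBad
  constructor
  · rintro (⟨m, hm, hz, hcl⟩ | ⟨l, m, hlm, hm, hl, hz, hd⟩)
    · exact absurd hcl (by omega)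
    · cases l with
      | zero =>
        cases m with
        | zero => omega
        | succ m' =>
          left
          exact ⟨m', by simpa using hm, by simpa using hz, by push_cast at hd ⊢; omega⟩
      | succ l' =>
        cases m with
        | zero => omega
        | succ m' =>
          right
          exact ⟨l', m', by omega, by simpa using hm, by simpa using hl,
            by simpa using hz, by push_cast at hd ⊢; omega⟩
  · rintro (⟨m, hm, hz, hcl⟩ | ⟨l, m, hlm, hm, hl, hz, hd⟩)
    · right
      exact ⟨0, m + 1, by omega, by simpa using hm, by simpa using hv,
        by simpa using hz, by push_cast at hcl ⊢; omega⟩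
    · right
      exact ⟨l + 1, m + 1, by omega, by simpa using hm, by simpa using hl,
        by simpa using hz, by push_cast at hd ⊢; omega⟩

theorem loop_false_iff (vals : List Int) :
    ∀ cnt level : Int, solutionLoop vals cnt level = false ↔ pairBad vals cnt level := by
  induction vals with
  | nil =>
    intro cnt level
    simp [solutionLoop, pairBad]
  | cons v rest ih =>
    intro cnt level
    by_cases hv : v = 0
    · subst hv
      rw [show solutionLoop (0 :: rest) cnt level = solutionLoop rest (cnt + 1) level from by
        simp [solutionLoop]]
      rw [ih, pairBad_cons_zero]
    · have hvb : (v == (0 : Int)) = false := by simp [hv]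
      by_cases hc : cnt < level
      · rw [show solutionLoop (v :: rest) cnt level = false from by simp [solutionLoop, hvb, hc]]
        constructor
        · intro _
          exact Or.inl ⟨0, by simp, by simpa using hv, by simpa using hc⟩
        · intro _; rfl
      · rw [show solutionLoop (v :: rest) cnt level = solutionLoop rest 0 level from by
          simp [solutionLoop, hvb, hc]]
        rw [ih, pairBad_cons_ne v rest cnt level hv hc]

-- the full-list pair condition B's nested loops decide
def pairFull (lineUp : List Int) (s : Nat) (level : Int) : Prop :=
  ∃ i j : Int, (s : Int) ≤ i ∧ i < j ∧ j ≤ i + level ∧ j < (lineUp.length : Int) ∧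
    PySem.List.pyGetD lineUp i 0 ≠ 0 ∧ PySem.List.pyGetD lineUp j 0 ≠ 0

theorem alt_any_iff (lineUp : List Int) (level : Int) (s : Nat) :
    ((PySem.List.pyRange (s : Int) (lineUp.length : Int) 1).any (fun i =>
        (PySem.List.pyGetD lineUp i 0 != 0) &&
        (PySem.List.pyRange (i + 1) (min (i + level + 1) (lineUp.length : Int)) 1).any (fun j =>
          PySem.List.pyGetD lineUp j 0 != 0))) = true ↔ pairFull lineUp s level := by
  unfold pairFull
  simp only [List.any_eq_true, PySem.List.mem_pyRange_one, Bool.and_eq_true, bne_iff_ne, ne_eq]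
  constructor
  · rintro ⟨i, ⟨hsi, hin⟩, hi0, j, ⟨hij, hjm⟩, hj0⟩
    exact ⟨i, j, hsi, by omega, by omega, by omega, hi0, hj0⟩
  · rintro ⟨i, j, h1, h2, h3, h4, h5, h6⟩
    exact ⟨i, ⟨h1, by omega⟩, h5, j, ⟨by omega, by omega⟩, h6⟩

theorem pyGetD_toNat (lineUp : List Int) (i : Int) (h : 0 ≤ i) :
    PySem.List.pyGetD lineUp i 0 = lineUp.getD i.toNat 0 := by
  rw [show i = ((i.toNat : Nat) : Int) from by omega, PySem.List.pyGetD_natCast, Int.toNat_natCast]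

theorem bridge (lineUp : List Int) (level : Int) (s : Nat)
    (hidx : PySem.List.index? lineUp 1 = some s) :
    pairBad (lineUp.drop (s + 1)) 0 level ↔ pairFull lineUp s level := by
  obtain ⟨hs, hval, -⟩ := PySem.List.getElem_of_index?_eq_some hidx
  have hsget : lineUp.getD s 0 = 1 := by rw [List.getD_eq_getElem?_getD, List.getElem?_eq_getElem hs, hval]; rfl
  unfold pairBad pairFull
  constructor
  · rintro (⟨m, hm, hz, hc⟩ | ⟨l, m, hlm, hm, hl, hz, hd⟩)
    · rw [List.length_drop] at hm
      refine ⟨(s : Int), (s : Int) + 1 + m, le_refl _, by omega, by omega, by omega, ?_, ?_⟩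
      · rw [pyGetD_toNat _ _ (by omega), Int.toNat_natCast, hsget]
        exact one_ne_zero
      · rw [pyGetD_toNat _ _ (by omega), show ((s : Int) + 1 + m).toNat = s + 1 + m from by omega,
          ← getD_drop_int]
        exact hz
    · rw [List.length_drop] at hm
      refine ⟨(s : Int) + 1 + l, (s : Int) + 1 + m, by omega, by omega, by omega, by omega, ?_, ?_⟩
      · rw [pyGetD_toNat _ _ (by omega), show ((s : Int) + 1 + l).toNat = s + 1 + l from by omega,
          ← getD_drop_int]
        exact hl
      · rw [pyGetD_toNat _ _ (by omega), show ((s : Int) + 1 + m).toNat = s + 1 + m from by omega,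
          ← getD_drop_int]
        exact hz
  · rintro ⟨i, j, h1, h2, h3, h4, h5, h6⟩
    have hi0 : 0 ≤ i := by omega
    have hj0 : 0 ≤ j := by omega
    rw [pyGetD_toNat _ _ hi0] at h5
    rw [pyGetD_toNat _ _ hj0] at h6
    by_cases his : i = (s : Int)
    · left
      refine ⟨j.toNat - s - 1, by rw [List.length_drop]; omega, ?_, by omega⟩
      rw [getD_drop_int, show s + 1 + (j.toNat - s - 1) = j.toNat from by omega]
      exact h6
    · right
      refine ⟨i.toNat - s - 1, j.toNat - s - 1, by omega, by rw [List.length_drop]; omega, ?_, ?_, by omega⟩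
      · rw [getD_drop_int, show s + 1 + (i.toNat - s - 1) = i.toNat from by omega]
        exact h5
      · rw [getD_drop_int, show s + 1 + (j.toNat - s - 1) = j.toNat from by omega]
        exact h6

-- ===== VERDICT (by name: the statement is the Claim_ definition above) =====
theorem solution_spec : Claim_equal_solution := by
  intro lineUp level _ hpre
  unfold Spec_solution solution solution_alt
  cases h : PySem.List.index? lineUp 1 with
  | none => rfl
  | some s =>
    simp only
    rw [PySem.List.slice_from lineUp (by omega : (0 : Int) ≤ (s : Int) + 1),
      show ((s : Int) + 1).toNat = s + 1 from by omega]
    have hA := loop_false_iff (lineUp.drop (s + 1)) 0 level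
    have hB := alt_any_iff lineUp level s
    have hbr := bridge lineUp level s h
    cases hX : ((PySem.List.pyRange (s : Int) (lineUp.length : Int) 1).any (fun i =>
        (PySem.List.pyGetD lineUp i 0 != 0) &&
        (PySem.List.pyRange (i + 1) (min (i + level + 1) (lineUp.length : Int)) 1).any (fun j =>
          PySem.List.pyGetD lineUp j 0 != 0))) with
    | true =>
      exact (hA.mpr (hbr.mpr (hB.mp hX))).trans rfl
    | false =>
      cases hL : solutionLoop (lineUp.drop (s + 1)) 0 level with
      | true => rfl
      | false =>
        have hpf : pairFull lineUp s level := hbr.mp ((loop_false_iff _ 0 level).mp hL)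
        have hXt := hB.mpr hpf
        rw [hX] at hXt
        simp at hXt
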